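-- pv_equiv track=rewrite | github.com/Clube-do-Enrolado/Compiladores | Lexical/afds.py | afd_keywords
-- ===== SOURCE A (Python) =====
-- def afd_keywords(lexem):
--     """Função que verifica se o lexema é uma palavra reservada
--
--     Função que utiliza um AFD (ou DFA) para avaliar a corretude
--     da sintaxe de um lexema concorrente à palavra reservada
--     (keyword).
--
--     Parameter:
--     ----------
--     lexem (string): O lexema a ser analisado pelo AFD.
--
--     Return:
--     (boolean, string): Retorna uma tupla informando se
--     o lexema foi reconhecido e qual o tipo do lexema.
--
--     """
--     # Palavras reservadas (keywords) definidas pelo grupo: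
--     # ["if","else","elif","def","for","while","return","break","print","input","in","and","or","not","range"]
--     transition_table = {
--             1:  {'a':15, 'b':16, 'd':17, 'e':18, 'f':19, 'i':20, 'n':21, 'o':22, 'p':23, 'r':24, 'w': 25},
--
--             19: {'o':22},
--             20: {'f':3 , 'n':29},
--             23: {'r':30},
--             24: {'a':31 , 'e':32},
--             25: {'h':33},
--
--             16: {'r':27},
--             18: {'l':28},
--             22: {'r':3},
--             29: {'p':6},
--             30: {'i':7},
--             31: {'n':8},
--             32: {'t':9},
--             33: {'i':10},
--
--             27: {'e':2 },
--             17: {'e':4},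
--             28: {'i':4 , 's':5 },
--             6:  {'u':12},
--             21: {'o':12},
--             7:  {'n':12},
--             8:  {'g':5},
--             9:  {'u':13},
--             10: {'l':5},
--
--
--             15: {'n':26},
--             2:  {'a':11},
--             4:  {'f':3 },
--             12: {'t':3},
--             5:  {'e':3},
--             13: {'r':14},
--
--             26: {'d':3},
--             11: {'k':3},
--             14: {'n':3},
--             }
--
--     current_state = 1
--     ESTADOS_FINAIS = [3,29] # Estados finais possíveis
--
--     for char in lexem:
--         # Se o caractere lido não for válido entre as opções dadas
--         if char not in transition_table[current_state].keys():
--             # O lexema não é válido.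
--             return (False,None)
--
--         else: # Muda de estado.
--             current_state = transition_table[current_state][char]
--
--     # Está no estado final e não existem mais caracteres para leitura.
--     if current_state in ESTADOS_FINAIS:
--         return (True,lexem.upper())
--     else:
--         return (False,None)
-- ===== SOURCE B (Python) =====
-- # B: replaces the per-character DFA walk by a single membership test in the
-- # set of the 15 reserved keywords the DFA accepts (simpler; no state machine).
-- KEYWORDS = frozenset(["if", "else", "elif", "def", "for", "while", "return",
--                       "break", "print", "input", "in", "and", "or", "not", "range"])
--
--
-- def afd_keywords(lexem):
--     if lexem in KEYWORDS:
--         return (True, lexem.upper())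
--     return (False, None)
-- ===== Notes on version B (the rewrite author's own statement) =====
-- stated objective: simpler
-- what changed: The hand-built DFA transition-table walk over the characters is replaced by one membership test of the whole lexeme in a frozenset of the 15 reserved keywords.
import Mathlib
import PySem

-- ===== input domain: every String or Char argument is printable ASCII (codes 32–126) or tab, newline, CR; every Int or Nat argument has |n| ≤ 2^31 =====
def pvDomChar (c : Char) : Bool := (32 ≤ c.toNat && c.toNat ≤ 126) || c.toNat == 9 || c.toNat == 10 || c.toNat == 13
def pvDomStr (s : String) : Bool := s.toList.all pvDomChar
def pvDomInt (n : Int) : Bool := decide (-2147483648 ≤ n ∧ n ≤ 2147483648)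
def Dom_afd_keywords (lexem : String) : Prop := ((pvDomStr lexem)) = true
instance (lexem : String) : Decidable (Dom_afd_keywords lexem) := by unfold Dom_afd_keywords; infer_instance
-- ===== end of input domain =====

-- B replaces A's per-character DFA walk by one membership test in the set of the
-- 15 reserved keywords (simpler). Pre_ excludes exactly the inputs where A raises KeyError.

-- ===== PORT A =====
-- the literal transition table of A
def afdTable : PySem.Dict Int (PySem.Dict Char Int) := PySem.Dict.ofList [
  (1,  PySem.Dict.ofList [('a',15), ('b',16), ('d',17), ('e',18), ('f',19), ('i',20), ('n',21), ('o',22), ('p',23), ('r',24), ('w',25)]),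
  (19, PySem.Dict.ofList [('o',22)]),
  (20, PySem.Dict.ofList [('f',3), ('n',29)]),
  (23, PySem.Dict.ofList [('r',30)]),
  (24, PySem.Dict.ofList [('a',31), ('e',32)]),
  (25, PySem.Dict.ofList [('h',33)]),
  (16, PySem.Dict.ofList [('r',27)]),
  (18, PySem.Dict.ofList [('l',28)]),
  (22, PySem.Dict.ofList [('r',3)]),
  (29, PySem.Dict.ofList [('p',6)]),
  (30, PySem.Dict.ofList [('i',7)]),
  (31, PySem.Dict.ofList [('n',8)]),
  (32, PySem.Dict.ofList [('t',9)]),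
  (33, PySem.Dict.ofList [('i',10)]),
  (27, PySem.Dict.ofList [('e',2)]),
  (17, PySem.Dict.ofList [('e',4)]),
  (28, PySem.Dict.ofList [('i',4), ('s',5)]),
  (6,  PySem.Dict.ofList [('u',12)]),
  (21, PySem.Dict.ofList [('o',12)]),
  (7,  PySem.Dict.ofList [('n',12)]),
  (8,  PySem.Dict.ofList [('g',5)]),
  (9,  PySem.Dict.ofList [('u',13)]),
  (10, PySem.Dict.ofList [('l',5)]),
  (15, PySem.Dict.ofList [('n',26)]),
  (2,  PySem.Dict.ofList [('a',11)]),
  (4,  PySem.Dict.ofList [('f',3)]),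
  (12, PySem.Dict.ofList [('t',3)]),
  (5,  PySem.Dict.ofList [('e',3)]),
  (13, PySem.Dict.ofList [('r',14)]),
  (26, PySem.Dict.ofList [('d',3)]),
  (11, PySem.Dict.ofList [('k',3)]),
  (14, PySem.Dict.ofList [('n',3)])]

-- the 'for char in lexem' loop with its early return; current_state threaded as argument.
-- In the 'afdTable.get? s = none' branch Python raises KeyError (state 3 has no row):
-- excluded by Pre_afd_keywords.
def afdLoop (lexem : String) : List Char → Int → Bool × Option String
  | [], s => if s ∈ ([3, 29] : List Int) then (true, some (PySem.Str.upper lexem)) else (false, none)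
  | c :: rest, s =>
    match afdTable.get? s with
    | none => (false, none)      -- KeyError in Python; outside Pre_
    | some row =>
      match row.get? c with
      | none => (false, none)    -- 'char not in transition_table[current_state].keys()'
      | some s' => afdLoop lexem rest s'

def afd_keywords (lexem : String) : Bool × Option String :=
  afdLoop lexem lexem.toList 1

-- ===== PORT B =====
def pvKeywords : List String :=
  ["if", "else", "elif", "def", "for", "while", "return", "break", "print", "input",
   "in", "and", "or", "not", "range"]

def afd_keywords_alt (lexem : String) : Bool × Option String :=
  if lexem ∈ pvKeywords then (true, some (PySem.Str.upper lexem)) else (false, none)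

-- ===== PRECONDITION & SPEC =====
-- the 14 keywords whose DFA path ends in state 3 (all but "in", which ends in state 29)
def pvK3 : List String :=
  ["if", "else", "elif", "def", "for", "while", "return", "break", "print", "input",
   "and", "or", "not", "range"]

-- Pre_ excludes exactly the lexemes on which A raises KeyError: those with a keyword
-- other than "in" as a proper prefix (DFA state 3 has no row in the transition table).
def Pre_afd_keywords (lexem : String) : Prop :=
  ∀ k ∈ pvK3, ¬ (k.toList <+: lexem.toList ∧ k.toList ≠ lexem.toList)
instance (lexem : String) : Decidable (Pre_afd_keywords lexem) := by
  unfold Pre_afd_keywords; infer_instance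

def pvWitness_afd_keywords : String := "while"

def Spec_afd_keywords (lexem : String) (out : Bool × Option String) : Prop :=
  out = afd_keywords_alt lexem
instance (lexem : String) (out : Bool × Option String) : Decidable (Spec_afd_keywords lexem out) := by
  unfold Spec_afd_keywords; infer_instance

-- ===== CLAIM (what is proved, stated in full; the proofs are below) =====
def Claim_equal_afd_keywords : Prop :=
  ∀ (lexem : String), Dom_afd_keywords lexem → Pre_afd_keywords lexem →
    Spec_afd_keywords lexem (afd_keywords lexem)

-- ===== LEMMAS AND PROOFS =====

-- proof-side tables: for each DFA state s, the suffixes that lead from s to an accepting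
-- state (pvSuffC) and those that lead from s to state 3 specifically (pvSuff3)
def pvAllStates : List Int :=
  [1, 2, 3, 4, 5, 6, 7, 8, 9, 10, 11, 12, 13, 14, 15, 16, 17, 18, 19, 20, 21, 22,
   23, 24, 25, 26, 27, 28, 29, 30, 31, 32, 33]

def pvSuffC (s : Int) : List (List Char) :=
  (([
    (1,  pvKeywords.map String.toList),
    (2,  ["ak".toList]), (3,  [[]]), (4,  ["f".toList]), (5,  ["e".toList]),
    (6,  ["ut".toList]), (7,  ["nt".toList]), (8,  ["ge".toList]), (9,  ["urn".toList]),
    (10, ["le".toList]), (11, ["k".toList]), (12, ["t".toList]), (13, ["rn".toList]),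
    (14, ["n".toList]), (15, ["nd".toList]), (16, ["reak".toList]), (17, ["ef".toList]),
    (18, ["lse".toList, "lif".toList]), (19, ["or".toList]),
    (20, ["f".toList, "n".toList, "nput".toList]), (21, ["ot".toList]),
    (22, ["r".toList]), (23, ["rint".toList]), (24, ["ange".toList, "eturn".toList]),
    (25, ["hile".toList]), (26, ["d".toList]), (27, ["eak".toList]),
    (28, ["se".toList, "if".toList]), (29, [[], "put".toList]), (30, ["int".toList]),
    (31, ["nge".toList]), (32, ["turn".toList]), (33, ["ile".toList])
   ] : List (Int × List (List Char))).lookup s).getD []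

def pvSuff3 (s : Int) : List (List Char) :=
  (([
    (1,  pvK3.map String.toList),
    (2,  ["ak".toList]), (3,  [[]]), (4,  ["f".toList]), (5,  ["e".toList]),
    (6,  ["ut".toList]), (7,  ["nt".toList]), (8,  ["ge".toList]), (9,  ["urn".toList]),
    (10, ["le".toList]), (11, ["k".toList]), (12, ["t".toList]), (13, ["rn".toList]),
    (14, ["n".toList]), (15, ["nd".toList]), (16, ["reak".toList]), (17, ["ef".toList]),
    (18, ["lse".toList, "lif".toList]), (19, ["or".toList]),
    (20, ["f".toList, "nput".toList]), (21, ["ot".toList]),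
    (22, ["r".toList]), (23, ["rint".toList]), (24, ["ange".toList, "eturn".toList]),
    (25, ["hile".toList]), (26, ["d".toList]), (27, ["eak".toList]),
    (28, ["se".toList, "if".toList]), (29, ["put".toList]), (30, ["int".toList]),
    (31, ["nge".toList]), (32, ["turn".toList]), (33, ["ile".toList])
   ] : List (Int × List (List Char))).lookup s).getD []

-- ([] accepted from s) ↔ s is final
lemma pv_fact_nil : ∀ s ∈ pvAllStates,
    (([] : List Char) ∈ pvSuffC s ↔ s ∈ ([3, 29] : List Int)) := by decide

-- a state without a row in the table (only state 3) has [] ∈ pvSuff3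
lemma pv_fact_none : ∀ s ∈ pvAllStates,
    afdTable.get? s = none → ([] : List Char) ∈ pvSuff3 s := by decide

-- every transition preserves the tables upward and stays inside pvAllStates
lemma pv_fact_trans : pvAllStates.all (fun s =>
    match afdTable.get? s with
    | none => true
    | some row => row.items.all (fun p =>
        decide (p.2 ∈ pvAllStates) &&
        (pvSuff3 p.2).all (fun u => decide ((p.1 :: u) ∈ pvSuff3 s)) &&
        (pvSuffC p.2).all (fun u => decide ((p.1 :: u) ∈ pvSuffC s)))) = true := by decide

-- every nonempty accepted suffix factors through a transition
lemma pv_fact_down : pvAllStates.all (fun s =>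
    (pvSuffC s).all (fun w =>
      match w with
      | [] => true
      | c :: u =>
        match afdTable.get? s with
        | none => false
        | some row =>
          match row.get? c with
          | none => false
          | some s' => decide (u ∈ pvSuffC s'))) = true := by decide

-- main invariant of A's loop
lemma pv_loop_inv (lexem : String) : ∀ (cs : List Char) (s : Int), s ∈ pvAllStates →
    (∀ w ∈ pvSuff3 s, ¬ (w <+: cs ∧ w ≠ cs)) →
    afdLoop lexem cs s =
      (if cs ∈ pvSuffC s then (true, some (PySem.Str.upper lexem)) else (false, none)) := by
  intro cs
  induction cs with
  | nil =>
    intro s hs _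
    simp only [afdLoop]
    by_cases h3 : s ∈ ([3, 29] : List Int)
    · rw [if_pos h3, if_pos ((pv_fact_nil s hs).2 h3)]
    · rw [if_neg h3, if_neg (fun hmem => h3 ((pv_fact_nil s hs).1 hmem))]
  | cons c rest ih =>
    intro s hs h3
    simp only [afdLoop]
    cases htab : afdTable.get? s with
    | none =>
      exact absurd ⟨List.nil_prefix, by simp⟩ (h3 [] (pv_fact_none s hs htab))
    | some row =>
      cases hrow : row.get? c with
      | none =>
        -- c :: rest cannot be in pvSuffC s: pv_fact_down would give a transition on c
        simp only [hrow]
        rw [if_neg]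
        intro hmem
        have hd := (List.all_eq_true.mp pv_fact_down) s hs
        have := (List.all_eq_true.mp hd) (c :: rest) hmem
        simp only [htab, hrow] at this
        exact Bool.false_ne_true this
      | some s' =>
        simp only [hrow]
        have hitem : (c, s') ∈ row.items := PySem.Dict.mem_items_of_get?_eq_some _ hrow
        have ht := (List.all_eq_true.mp pv_fact_trans) s hs
        simp only [htab] at ht
        have ht' := (List.all_eq_true.mp ht) (c, s') hitem
        simp only [Bool.and_eq_true, List.all_eq_true, decide_eq_true_eq] at ht'
        obtain ⟨⟨hs', h3up⟩, hCup⟩ := ht'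
        have hrec := ih s' hs' (fun u hu => by
          intro ⟨hpre, hne⟩
          exact h3 (c :: u) (h3up u hu) ⟨List.cons_prefix_cons.mpr ⟨rfl, hpre⟩, by
            simp only [ne_eq, List.cons.injEq, not_and]; intro _; exact hne⟩)
        rw [hrec]
        -- (c :: rest ∈ pvSuffC s) ↔ (rest ∈ pvSuffC s')
        by_cases hr : rest ∈ pvSuffC s'
        · rw [if_pos hr, if_pos (hCup rest hr)]
        · rw [if_neg hr, if_neg]
          intro hmem
          have hd := (List.all_eq_true.mp pv_fact_down) s hs
          have := (List.all_eq_true.mp hd) (c :: rest) hmem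
          simp only [htab, hrow, decide_eq_true_eq] at this
          exact hr this

lemma pv_suffC_one (lexem : String) :
    lexem.toList ∈ pvSuffC 1 ↔ lexem ∈ pvKeywords := by
  constructor
  · intro h
    have h' : lexem.toList ∈ pvKeywords.map String.toList := h
    obtain ⟨k, hk, hek⟩ := List.mem_map.mp h'
    exact (String.toList_inj.mp hek) ▸ hk
  · intro h
    exact (List.mem_map.mpr ⟨lexem, h, rfl⟩ : lexem.toList ∈ pvKeywords.map String.toList)

lemma pv_suff3_one (lexem : String) (hpre : Pre_afd_keywords lexem) :
    ∀ w ∈ pvSuff3 1, ¬ (w <+: lexem.toList ∧ w ≠ lexem.toList) := by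
  intro w hw
  have hw' : w ∈ pvK3.map String.toList := hw
  obtain ⟨k, hk, hek⟩ := List.mem_map.mp hw'
  subst hek
  exact hpre k hk

-- ===== VERDICT (by name: the statement is the Claim_ definition above) =====
theorem afd_keywords_spec : Claim_equal_afd_keywords := by
  intro lexem _ hpre
  show afd_keywords lexem = afd_keywords_alt lexem
  rw [afd_keywords, pv_loop_inv lexem lexem.toList 1 (by decide) (pv_suff3_one lexem hpre),
      afd_keywords_alt]
  by_cases h : lexem ∈ pvKeywords
  · rw [if_pos h, if_pos ((pv_suffC_one lexem).mpr h)]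
  · rw [if_neg h, if_neg (fun hm => h ((pv_suffC_one lexem).mp hm))]
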